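-- pv_equiv track=rewrite | github.com/dalvirushikesh/Backtracking-4 | prob-1.py | bfs
-- ===== SOURCE A (Python) =====
-- from collections import deque
--
-- def bfs(grid):
--     h, w = len(grid), len(grid[0])
--     visited = [[False for _ in range(w)] for _ in range(h)]
--     q = deque()
--
--     for i in range(h):
--         for j in range(w):
--             if grid[i][j] == 0:
--                 q.append((i, j))
--                 visited[i][j] = True
--
--     dist = -1
--     directions = [(0, 1), (1, 0), (-1, 0), (0, -1)]
--
--     while q:
--         for _ in range(len(q)):
--             x, y = q.popleft()
--             for dx, dy in directions:
--                 nx, ny = x + dx, y + dy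
--                 if 0 <= nx < h and 0 <= ny < w and not visited[nx][ny]:
--                     visited[nx][ny] = True
--                     q.append((nx, ny))
--         dist += 1
--     return dist
-- ===== SOURCE B (Python) =====
-- def bfs(grid):
--     h, w = len(grid), len(grid[0])
--     INF = h + w  # strictly larger than any real distance inside the grid
--     # forward pass: nearest-zero distance using only up/left propagation
--     dp = []
--     for i in range(h):
--         row = []
--         for j in range(w):
--             v = 0 if grid[i][j] == 0 else INF
--             if dp and dp[-1][j] + 1 < v:
--                 v = dp[-1][j] + 1
--             if row and row[-1] + 1 < v:
--                 v = row[-1] + 1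
--             row.append(v)
--         dp.append(row)
--     # backward pass: add down/right propagation, track the maximum finite distance
--     best = -1
--     below = []
--     for i in range(h - 1, -1, -1):
--         cur = []
--         for j in range(w - 1, -1, -1):
--             v = dp[i][j]
--             if below and below[j] + 1 < v:
--                 v = below[j] + 1
--             if cur and cur[0] + 1 < v:
--                 v = cur[0] + 1
--             cur = [v] + cur
--             if v < INF and v > best:
--                 best = v
--         below = cur
--     return best
-- ===== Notes on version B (the rewrite author's own statement) =====
-- stated objective: alternative
-- what changed: B abandons BFS entirely: instead of a multi-source queue with visited marking, it computes the distance-to-nearest-zero transform by two dynamic-programming sweeps over the grid (forward pass propagating from up/left, backward pass from down/right) and returns the maximum finite entry, -1 when there is none.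
import Mathlib
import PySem

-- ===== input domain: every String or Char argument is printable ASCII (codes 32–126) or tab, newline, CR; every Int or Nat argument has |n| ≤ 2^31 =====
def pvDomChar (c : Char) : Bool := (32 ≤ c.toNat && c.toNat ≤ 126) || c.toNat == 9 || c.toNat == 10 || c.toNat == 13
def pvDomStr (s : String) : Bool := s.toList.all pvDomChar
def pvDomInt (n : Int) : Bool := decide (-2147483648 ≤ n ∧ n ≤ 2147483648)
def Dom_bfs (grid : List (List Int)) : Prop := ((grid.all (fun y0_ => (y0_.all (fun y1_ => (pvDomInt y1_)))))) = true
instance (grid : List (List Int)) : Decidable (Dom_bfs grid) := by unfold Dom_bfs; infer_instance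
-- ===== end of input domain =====

-- B replaces A's multi-source BFS (queue + visited matrix) by a two-sweep dynamic-programming
-- distance transform and returns the maximum finite distance (objective: alternative).

-- ===== PORT A =====
-- visited[x][y]  (only read/written when the 0 ≤ x < h, 0 ≤ y < w guard already holds, so getD/toNat are exact)
def pvGetVis (V : List (List Bool)) (x y : Int) : Bool :=
  (V.getD x.toNat []).getD y.toNat false

-- visited[x][y] = True
def pvSetVis (V : List (List Bool)) (x y : Int) : List (List Bool) :=
  V.set x.toNat ((V.getD x.toNat []).set y.toNat true)

def pvDirs : List (Int × Int) := [(0, 1), (1, 0), (-1, 0), (0, -1)]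

-- A's inner 'for _ in range(len(q)): x, y = q.popleft(); for dx, dy in directions: …';
-- n is the captured len(q); the [] branch is unreachable (Python pops exactly the n elements present)
def pvLevelA (h w : Int) : Nat → List (Int × Int) → List (List Bool) →
    (List (Int × Int) × List (List Bool))
  | 0, q, V => (q, V)
  | n + 1, q, V =>
    match q with
    | [] => (q, V)
    | (x, y) :: rest =>
      let s := pvDirs.foldl (fun (s : List (Int × Int) × List (List Bool)) d =>
        let nx := x + d.1
        let ny := y + d.2
        if 0 ≤ nx ∧ nx < h ∧ 0 ≤ ny ∧ ny < w ∧ pvGetVis s.2 nx ny = false then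
          (s.1 ++ [(nx, ny)], pvSetVis s.2 nx ny)
        else s) (rest, V)
      pvLevelA h w n s.1 s.2

-- A's 'while q:' loop; the Nat argument is fuel (a totality guard only: one unit per level;
-- the call site passes h*w+1, which always suffices since levels are bounded by the cell count)
def pvWhileA (h w : Int) : Nat → List (Int × Int) → List (List Bool) → Int → Int
  | 0, _, _, dist => dist
  | f + 1, q, V, dist =>
    if q.isEmpty then dist
    else
      let s := pvLevelA h w q.length q V
      pvWhileA h w f s.1 s.2 (dist + 1)

def bfs (grid : List (List Int)) : Int :=
  let h : Int := grid.length
  let w : Int := (PySem.List.pyGetD grid 0 []).length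
  let V0 : List (List Bool) :=
    (PySem.List.pyRange 0 h 1).map (fun _ => (PySem.List.pyRange 0 w 1).map (fun _ => false))
  let init := (PySem.List.pyRange 0 h 1).foldl (fun s i =>
      (PySem.List.pyRange 0 w 1).foldl
        (fun (s : List (Int × Int) × List (List Bool)) j =>
          if PySem.List.pyGetD (PySem.List.pyGetD grid i []) j 0 = 0 then
            (s.1 ++ [(i, j)], pvSetVis s.2 i j)
          else s) s) ([], V0)
  pvWhileA h w (grid.length * (PySem.List.pyGetD grid 0 []).length + 1) init.1 init.2 (-1)

-- ===== PORT B =====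
-- forward-pass row step: v = min(0|INF, dp[-1][j]+1, row[-1]+1) written as B's if-chains
def pvFStep (grid : List (List Int)) (INF i : Int) (dp : List (List Int))
    (row : List Int) (j : Int) : List Int :=
  let v : Int := if PySem.List.pyGetD (PySem.List.pyGetD grid i []) j 0 = 0 then 0 else INF
  let v : Int := if dp ≠ [] ∧ PySem.List.pyGetD (PySem.List.pyGetD dp (-1) []) j 0 + 1 < v
                 then PySem.List.pyGetD (PySem.List.pyGetD dp (-1) []) j 0 + 1 else v
  let v : Int := if row ≠ [] ∧ PySem.List.pyGetD row (-1) 0 + 1 < v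
                 then PySem.List.pyGetD row (-1) 0 + 1 else v
  row ++ [v]

-- backward-pass cell step on state (best, cur); 'below' is the already-finished row i+1
def pvBStep (INF : Int) (dp : List (List Int)) (below : List Int) (i : Int)
    (t : Int × List Int) (j : Int) : Int × List Int :=
  let v : Int := PySem.List.pyGetD (PySem.List.pyGetD dp i []) j 0
  let v : Int := if below ≠ [] ∧ PySem.List.pyGetD below j 0 + 1 < v
                 then PySem.List.pyGetD below j 0 + 1 else v
  let v : Int := if t.2 ≠ [] ∧ PySem.List.pyGetD t.2 0 0 + 1 < v
                 then PySem.List.pyGetD t.2 0 0 + 1 else v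
  let cur := [v] ++ t.2
  let best := if v < INF ∧ v > t.1 then v else t.1
  (best, cur)

def bfs_alt (grid : List (List Int)) : Int :=
  let h : Int := grid.length
  let w : Int := (PySem.List.pyGetD grid 0 []).length
  let INF : Int := h + w
  let dp := (PySem.List.pyRange 0 h 1).foldl (fun (dp : List (List Int)) i =>
      dp ++ [(PySem.List.pyRange 0 w 1).foldl (pvFStep grid INF i dp) []]) []
  let fin := (PySem.List.pyRange (h - 1) (-1) (-1)).foldl
      (fun (s : Int × List Int) i =>
        (PySem.List.pyRange (w - 1) (-1) (-1)).foldl (pvBStep INF dp s.2 i) (s.1, []))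
      (-1, [])
  fin.1

-- ===== PRECONDITION & SPEC =====
-- Pre_ excludes exactly the inputs where Python A raises an IndexError: the empty grid
-- (len(grid[0])) and grids with some row shorter than row 0 (grid[i][j]); A returns on all others.
def Pre_bfs (grid : List (List Int)) : Prop :=
  grid ≠ [] ∧ ∀ row ∈ grid, (PySem.List.pyGetD grid 0 []).length ≤ row.length

instance (grid : List (List Int)) : Decidable (Pre_bfs grid) := by unfold Pre_bfs; infer_instance

def pvWitness_bfs : List (List Int) := [[0, 1], [1, 1]]

def Spec_bfs (grid : List (List Int)) (out : Int) : Prop := out = bfs_alt grid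
instance (grid : List (List Int)) (out : Int) : Decidable (Spec_bfs grid out) := by unfold Spec_bfs; infer_instance

-- ===== CLAIM (what is proved, stated in full; the proofs are below) =====
def Claim_equal_bfs : Prop := ∀ (grid : List (List Int)), Dom_bfs grid → Pre_bfs grid → Spec_bfs grid (bfs grid)

-- ===== LEMMAS AND PROOFS =====

-- ---------- the common specification: min-Manhattan distance to a zero cell ----------

def pvWid (grid : List (List Int)) : Nat := (grid.getD 0 []).length

def pvG (grid : List (List Int)) (i j : Nat) : Int := (grid.getD i []).getD j 0

def pvZs (grid : List (List Int)) : List (Nat × Nat) :=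
  (List.range grid.length).flatMap (fun i =>
    ((List.range (pvWid grid)).filter (fun j => pvG grid i j = 0)).map (fun j => (i, j)))

def pvMd (c z : Nat × Nat) : Nat := Nat.dist c.1 z.1 + Nat.dist c.2 z.2

def pvD (grid : List (List Int)) (c : Nat × Nat) : Nat :=
  ((pvZs grid).map (pvMd c)).foldr min (grid.length + pvWid grid)

def pvCells (grid : List (List Int)) : List (Nat × Nat) :=
  (List.range grid.length).flatMap (fun i => (List.range (pvWid grid)).map (fun j => (i, j)))

def pvM (grid : List (List Int)) : Nat := ((pvCells grid).map (pvD grid)).foldr max 0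

def pvAns (grid : List (List Int)) : Int := if pvZs grid = [] then -1 else (pvM grid : Int)

theorem pvFoldrMin_le_base (a : Nat) (l : List Nat) : l.foldr min a ≤ a := by
  induction l with
  | nil => simp
  | cons x l ih => simpa using Or.inr ih

theorem pvFoldrMin_le_mem (a : Nat) (l : List Nat) (x : Nat) (hx : x ∈ l) : l.foldr min a ≤ x := by
  induction l with
  | nil => simp at hx
  | cons y l ih =>
    rcases List.mem_cons.mp hx with rfl | hx
    · simp
    · simpa using Or.inr (ih hx)

theorem pvFoldrMin_attains (a : Nat) (l : List Nat) :
    l.foldr min a = a ∨ l.foldr min a ∈ l := by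
  induction l with
  | nil => simp
  | cons x l ih =>
    rcases le_total x (l.foldr min a) with h | h
    · right; simp [min_eq_left h]
    · rcases ih with ih | ih
      · left; rw [List.foldr_cons, ih]; exact min_eq_right (ih ▸ h)
      · right; simp only [List.foldr_cons, List.mem_cons]
        right; rwa [min_eq_right h]

theorem pvFoldrMax_ge_mem (a : Nat) (l : List Nat) (x : Nat) (hx : x ∈ l) : x ≤ l.foldr max a := by
  induction l with
  | nil => simp at hx
  | cons y l ih =>
    rcases List.mem_cons.mp hx with rfl | hx
    · simp
    · simpa using Or.inr (ih hx)

theorem pvFoldrMax_attains (a : Nat) (l : List Nat) :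
    l.foldr max a = a ∨ l.foldr max a ∈ l := by
  induction l with
  | nil => simp
  | cons x l ih =>
    rcases le_total (l.foldr max a) x with h | h
    · right; simp [max_eq_left h]
    · rcases ih with ih | ih
      · left; rw [List.foldr_cons, ih]; exact max_eq_right (ih ▸ h)
      · right; simp only [List.foldr_cons, List.mem_cons]
        right; rwa [max_eq_right h]

theorem mem_pvZs (grid : List (List Int)) (z : Nat × Nat) :
    z ∈ pvZs grid ↔ z.1 < grid.length ∧ z.2 < pvWid grid ∧ pvG grid z.1 z.2 = 0 := by
  obtain ⟨a, b⟩ := z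
  simp [pvZs, List.mem_flatMap, List.mem_filter, List.mem_range]

theorem mem_pvCells (grid : List (List Int)) (c : Nat × Nat) :
    c ∈ pvCells grid ↔ c.1 < grid.length ∧ c.2 < pvWid grid := by
  obtain ⟨a, b⟩ := c
  simp [pvCells, List.mem_flatMap, List.mem_range]

theorem pvD_le_md (grid : List (List Int)) (c z : Nat × Nat) (hz : z ∈ pvZs grid) :
    pvD grid c ≤ pvMd c z :=
  pvFoldrMin_le_mem _ _ _ (List.mem_map.mpr ⟨z, hz, rfl⟩)

theorem pvD_le_INF (grid : List (List Int)) (c : Nat × Nat) :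
    pvD grid c ≤ grid.length + pvWid grid :=
  pvFoldrMin_le_base _ _

theorem pvD_attains (grid : List (List Int)) (c : Nat × Nat) :
    pvD grid c = grid.length + pvWid grid ∨ ∃ z ∈ pvZs grid, pvD grid c = pvMd c z := by
  rcases pvFoldrMin_attains (grid.length + pvWid grid) ((pvZs grid).map (pvMd c)) with h | h
  · exact Or.inl h
  · rcases List.mem_map.mp h with ⟨z, hz, hzz⟩
    exact Or.inr ⟨z, hz, hzz.symm⟩

theorem pvMd_lt (grid : List (List Int)) (c z : Nat × Nat)
    (hc1 : c.1 < grid.length) (hc2 : c.2 < pvWid grid)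
    (hz1 : z.1 < grid.length) (hz2 : z.2 < pvWid grid) :
    pvMd c z < grid.length + pvWid grid := by
  simp only [pvMd, Nat.dist]; omega

theorem pvD_lt_INF (grid : List (List Int)) (c : Nat × Nat) (hne : pvZs grid ≠ [])
    (hc1 : c.1 < grid.length) (hc2 : c.2 < pvWid grid) :
    pvD grid c < grid.length + pvWid grid := by
  rcases List.exists_mem_of_ne_nil _ hne with ⟨z, hz⟩
  have hzb := (mem_pvZs grid z).mp hz
  exact lt_of_le_of_lt (pvD_le_md grid c z hz) (pvMd_lt grid c z hc1 hc2 hzb.1 hzb.2.1)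

theorem pvD_lipschitz (grid : List (List Int)) (c c' : Nat × Nat) :
    pvD grid c ≤ pvD grid c' + pvMd c c' := by
  rcases pvD_attains grid c' with h | ⟨z, hz, h⟩
  · have := pvD_le_INF grid c
    omega
  · have h1 : pvD grid c ≤ pvMd c z := pvD_le_md grid c z hz
    have h2 : pvMd c z ≤ pvMd c' z + pvMd c c' := by
      simp only [pvMd]
      have t1 := Nat.dist.triangle_inequality c.1 c'.1 z.1
      have t2 := Nat.dist.triangle_inequality c.2 c'.2 z.2
      omega
    omega

theorem pvD_zero_of_mem (grid : List (List Int)) (z : Nat × Nat) (hz : z ∈ pvZs grid) :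
    pvD grid z = 0 := by
  have := pvD_le_md grid z z hz
  simp [pvMd, Nat.dist_self] at this
  omega

theorem pvD_zero_iff (grid : List (List Int)) (i j : Nat)
    (hi : i < grid.length) (hj : j < pvWid grid) :
    pvD grid (i, j) = 0 ↔ pvG grid i j = 0 := by
  constructor
  · intro h0
    rcases pvD_attains grid (i, j) with h | ⟨z, hz, h⟩
    · omega
    · have : (i, j) = z := by
        rw [h] at h0
        simp only [pvMd, Nat.dist] at h0
        obtain ⟨a, b⟩ := z
        simp only at h0 ⊢
        have : i = a ∧ j = b := by omega
        simp [this.1, this.2]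
      simpa [← this] using ((mem_pvZs grid z).mp hz).2.2
  · intro hg
    exact pvD_zero_of_mem grid (i, j) ((mem_pvZs grid (i, j)).mpr ⟨hi, hj, hg⟩)

theorem pvD_le_M (grid : List (List Int)) (c : Nat × Nat)
    (hc1 : c.1 < grid.length) (hc2 : c.2 < pvWid grid) : pvD grid c ≤ pvM grid :=
  pvFoldrMax_ge_mem _ _ _
    (List.mem_map.mpr ⟨c, (mem_pvCells grid c).mpr ⟨hc1, hc2⟩, rfl⟩)

theorem pvM_attains (grid : List (List Int)) (hne : pvZs grid ≠ []) :
    ∃ c : Nat × Nat, c.1 < grid.length ∧ c.2 < pvWid grid ∧ pvD grid c = pvM grid := by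
  rcases pvFoldrMax_attains 0 ((pvCells grid).map (pvD grid)) with h | h
  · rcases List.exists_mem_of_ne_nil _ hne with ⟨z, hz⟩
    have hzb := (mem_pvZs grid z).mp hz
    refine ⟨z, hzb.1, hzb.2.1, ?_⟩
    rw [pvD_zero_of_mem grid z hz, pvM, h]
  · rcases List.mem_map.mp h with ⟨c, hc, hcc⟩
    have hcb := (mem_pvCells grid c).mp hc
    exact ⟨c, hcb.1, hcb.2, hcc⟩

theorem pvM_succ_le (grid : List (List Int)) (hne : pvZs grid ≠ []) :
    pvM grid + 1 ≤ grid.length * pvWid grid := by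
  rcases pvM_attains grid hne with ⟨c, hc1, hc2, hc⟩
  have hlt := pvD_lt_INF grid c hne hc1 hc2
  have h1 : 1 ≤ grid.length := by omega
  have w1 : 1 ≤ pvWid grid := by omega
  have hM2 : pvM grid + 2 ≤ grid.length + pvWid grid := by
    rcases List.exists_mem_of_ne_nil _ hne with ⟨z, hz⟩
    have hzb := (mem_pvZs grid z).mp hz
    have := pvD_le_md grid c z hz
    have hmd : pvMd c z + 2 ≤ grid.length + pvWid grid := by
      simp only [pvMd, Nat.dist]; omega
    omega
  have : grid.length + pvWid grid ≤ grid.length * pvWid grid + 1 := by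
    rcases Nat.lt_or_ge grid.length 2 with h | h
    · interval_cases h' : grid.length <;> omega
    · rcases Nat.lt_or_ge (pvWid grid) 2 with h' | h'
      · interval_cases h'' : pvWid grid <;> omega
      · have := Nat.add_le_mul h h'
        omega
  omega

-- the four grid neighbours of a cell, in A's direction order
def pvNbrs (c : Int × Int) : List (Int × Int) :=
  [(c.1, c.2 + 1), (c.1 + 1, c.2), (c.1 - 1, c.2), (c.1, c.2 - 1)]

-- a geodesic step: any cell at distance k+1 is a neighbour of a cell at distance k
theorem pvD_geodesic (grid : List (List Int)) (hne : pvZs grid ≠ []) (i j k : Nat)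
    (hi : i < grid.length) (hj : j < pvWid grid) (hD : pvD grid (i, j) = k + 1) :
    ∃ p : Nat × Nat, p.1 < grid.length ∧ p.2 < pvWid grid ∧ pvD grid p = k ∧
      ((i : Int), (j : Int)) ∈ pvNbrs ((p.1 : Int), (p.2 : Int)) := by
  have hlt := pvD_lt_INF grid (i, j) hne hi hj
  rcases pvD_attains grid (i, j) with h | ⟨z, hz, h⟩
  · omega
  obtain ⟨a, b⟩ := z
  obtain ⟨hza, hzb2, -⟩ := (mem_pvZs grid (a, b)).mp hz
  simp only at hza hzb2
  have hmd : Nat.dist i a + Nat.dist j b = k + 1 := by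
    rw [h] at hD; simpa [pvMd] using hD
  have key : ∀ p : Nat × Nat, p.1 < grid.length → p.2 < pvWid grid →
      pvMd p (a, b) = k → pvMd (i, j) p = 1 → pvD grid p = k ∧ pvD grid (i, j) ≤ pvD grid p + 1 := by
    intro p hp1 hp2 hpk hadj
    have h1 : pvD grid p ≤ k := hpk ▸ pvD_le_md grid p (a, b) hz
    have h2 : pvD grid (i, j) ≤ pvD grid p + pvMd (i, j) p := pvD_lipschitz grid (i, j) p
    constructor
    · omega
    · omega
  by_cases hia : i < a
  · refine ⟨(i + 1, j), by omega, hj, ?_, ?_⟩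
    · have h1 : pvMd (i + 1, j) (a, b) = k := by simp only [pvMd, Nat.dist] at hmd ⊢; omega
      have h2 : pvMd (i, j) (i + 1, j) = 1 := by simp [pvMd, Nat.dist]
      exact (key (i + 1, j) (by omega) hj h1 h2).1
    · simp [pvNbrs, Prod.ext_iff]
  · by_cases hai : a < i
    · refine ⟨(i - 1, j), by omega, hj, ?_, ?_⟩
      · have h1 : pvMd (i - 1, j) (a, b) = k := by simp only [pvMd, Nat.dist] at hmd ⊢; omega
        have h2 : pvMd (i, j) (i - 1, j) = 1 := by simp only [pvMd, Nat.dist]; omega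
        exact (key (i - 1, j) (by omega) hj h1 h2).1
      · simp [pvNbrs, Prod.ext_iff]
        omega
    · have hia' : i = a := by omega
      by_cases hjb : j < b
      · refine ⟨(i, j + 1), hi, by omega, ?_, ?_⟩
        · have h1 : pvMd (i, j + 1) (a, b) = k := by simp only [pvMd, Nat.dist] at hmd ⊢; omega
          have h2 : pvMd (i, j) (i, j + 1) = 1 := by simp [pvMd, Nat.dist]
          exact (key (i, j + 1) hi (by omega) h1 h2).1
        · simp [pvNbrs, Prod.ext_iff]
      · by_cases hbj : b < j
        · refine ⟨(i, j - 1), hi, by omega, ?_, ?_⟩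
          · have h1 : pvMd (i, j - 1) (a, b) = k := by simp only [pvMd, Nat.dist] at hmd ⊢; omega
            have h2 : pvMd (i, j) (i, j - 1) = 1 := by simp only [pvMd, Nat.dist]; omega
            exact (key (i, j - 1) hi (by omega) h1 h2).1
          · simp [pvNbrs, Prod.ext_iff]
            omega
        · exfalso
          have : i = a ∧ j = b := by omega
          simp only [Nat.dist] at hmd
          omega

theorem pvLevel_nonempty (grid : List (List Int)) (hne : pvZs grid ≠ []) :
    ∀ k, k ≤ pvM grid → ∃ c : Nat × Nat, c.1 < grid.length ∧ c.2 < pvWid grid ∧ pvD grid c = k := by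
  have base := pvM_attains grid hne
  intro k hk
  induction hd : pvM grid - k generalizing k with
  | zero =>
    have : k = pvM grid := by omega
    rw [this]; exact base
  | succ n ih =>
    rcases ih (k + 1) (by omega) (by omega) with ⟨c, hc1, hc2, hc⟩
    rcases pvD_geodesic grid hne c.1 c.2 k hc1 hc2 (by simpa using hc) with ⟨p, hp1, hp2, hp, _⟩
    exact ⟨p, hp1, hp2, hp⟩


-- ---------- port A: BFS computes pvAns ----------

-- V is an h×w matrix
def pvDims (h w : Int) (V : List (List Bool)) : Prop :=
  (V.length : Int) = h ∧ ∀ row ∈ V, (row.length : Int) = w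

-- the visited matrix reads true exactly on the cells of the queue list q
def pvRelL (h w : Int) (V : List (List Bool)) (q : List (Int × Int)) : Prop :=
  ∀ x y : Int, 0 ≤ x → x < h → 0 ≤ y → y < w → (pvGetVis V x y = true ↔ (x, y) ∈ q)

theorem pvDims_set (h w : Int) (V : List (List Bool)) (x y : Int)
    (hD : pvDims h w V) (hx : 0 ≤ x) (hx' : x < h) : pvDims h w (pvSetVis V x y) := by
  obtain ⟨h1, h2⟩ := hD
  have hxV : x.toNat < V.length := by omega
  refine ⟨by simpa [pvSetVis] using h1, ?_⟩
  intro row hrow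
  rcases List.mem_or_eq_of_mem_set hrow with hm | hm
  · exact h2 _ hm
  · subst hm
    rw [List.getD_eq_getElem _ _ hxV]
    simpa using h2 _ (List.getElem_mem hxV)

theorem pvGetVis_setVis (h w : Int) (V : List (List Bool)) (x y a b : Int)
    (hD : pvDims h w V) (hx : 0 ≤ x) (hx' : x < h) (hy : 0 ≤ y) (hy' : y < w)
    (ha : 0 ≤ a) (_ha' : a < h) (hb : 0 ≤ b) (_hb' : b < w) :
    pvGetVis (pvSetVis V x y) a b = (pvGetVis V a b || decide (a = x ∧ b = y)) := by
  obtain ⟨h1, h2⟩ := hD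
  have hxV : x.toNat < V.length := by omega
  have hrowlen : ((V.getD x.toNat []).length : Int) = w := by
    rw [List.getD_eq_getElem _ _ hxV]; exact h2 _ (List.getElem_mem hxV)
  have hyrow : y.toNat < (V.getD x.toNat []).length := by omega
  unfold pvGetVis pvSetVis
  by_cases hax : a = x
  · subst hax
    rw [List.getD_eq_getElem _ _ (show a.toNat < (V.set a.toNat ((V.getD a.toNat []).set y.toNat true)).length by simpa using hxV)]
    rw [List.getElem_set_self]
    by_cases hby : b = y
    · subst hby
      rw [List.getD_eq_getElem?_getD] at hyrow
      rw [List.getD_eq_getElem?_getD, List.getElem?_set]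
      simp [hyrow]
    · have hne : y.toNat ≠ b.toNat := by omega
      rw [List.getD_eq_getElem?_getD, List.getElem?_set, if_neg hne]
      simp [List.getD_eq_getElem?_getD, hby]
  · have hne : x.toNat ≠ a.toNat := by omega
    rw [List.getD_eq_getElem?_getD (l := V.set x.toNat ((V.getD x.toNat []).set y.toNat true)),
        List.getElem?_set, if_neg hne]
    simp [List.getD_eq_getElem?_getD, hax]

-- one neighbour-candidate step of A's directions loop
def pvStepA (h w : Int) (s : List (Int × Int) × List (List Bool)) (c : Int × Int) :
    List (Int × Int) × List (List Bool) :=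
  if 0 ≤ c.1 ∧ c.1 < h ∧ 0 ≤ c.2 ∧ c.2 < w ∧ pvGetVis s.2 c.1 c.2 = false then
    (s.1 ++ [c], pvSetVis s.2 c.1 c.2)
  else s

-- an all-false matrix reads false everywhere
theorem pvGetVis_false (V : List (List Bool))
    (hV : ∀ row ∈ V, ∀ v ∈ row, v = false) (a b : Int) : pvGetVis V a b = false := by
  unfold pvGetVis
  rcases hrow : V[a.toNat]? with _ | row
  · simp [List.getD_eq_getElem?_getD, hrow]
  · have hmem := List.mem_of_getElem? hrow
    rcases hv : row[b.toNat]? with _ | v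
    · simp [List.getD_eq_getElem?_getD, hrow, hv]
    · have := hV row hmem v (List.mem_of_getElem? hv)
      simp [List.getD_eq_getElem?_getD, hrow, hv, this]

-- one row of the initialisation double loop
theorem pvInit_inner (h w i : Int) (grid : List (List Int)) (hi0 : 0 ≤ i) (hi1 : i < h) :
    ∀ (js : List Int), (∀ j ∈ js, 0 ≤ j ∧ j < w) →
    ∀ (q : List (Int × Int)) (V : List (List Bool)), pvDims h w V → pvRelL h w V q →
      (js.foldl (fun (s : List (Int × Int) × List (List Bool)) j =>
          if PySem.List.pyGetD (PySem.List.pyGetD grid i []) j 0 = 0 then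
            (s.1 ++ [(i, j)], pvSetVis s.2 i j)
          else s) (q, V)).1
        = q ++ (js.filter (fun j => PySem.List.pyGetD (PySem.List.pyGetD grid i []) j 0 = 0)).map
            (fun j => ((i, j) : Int × Int)) ∧
      pvDims h w (js.foldl (fun (s : List (Int × Int) × List (List Bool)) j =>
          if PySem.List.pyGetD (PySem.List.pyGetD grid i []) j 0 = 0 then
            (s.1 ++ [(i, j)], pvSetVis s.2 i j)
          else s) (q, V)).2 ∧
      pvRelL h w (js.foldl (fun (s : List (Int × Int) × List (List Bool)) j =>
          if PySem.List.pyGetD (PySem.List.pyGetD grid i []) j 0 = 0 then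
            (s.1 ++ [(i, j)], pvSetVis s.2 i j)
          else s) (q, V)).2
        ((js.foldl (fun (s : List (Int × Int) × List (List Bool)) j =>
          if PySem.List.pyGetD (PySem.List.pyGetD grid i []) j 0 = 0 then
            (s.1 ++ [(i, j)], pvSetVis s.2 i j)
          else s) (q, V)).1) := by
  intro js
  induction js with
  | nil => intro _ q V hD hR; exact ⟨by simp, hD, hR⟩
  | cons j js ihj =>
    intro hbnd q V hD hR
    obtain ⟨hj0, hj1⟩ := hbnd j (List.mem_cons_self)
    have hbnd' := fun j hj => hbnd j (List.mem_cons_of_mem _ hj)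
    by_cases hc : PySem.List.pyGetD (PySem.List.pyGetD grid i []) j 0 = 0
    · have hR' : pvRelL h w (pvSetVis V i j) (q ++ [(i, j)]) := by
        intro a b ha ha' hb hb'
        rw [pvGetVis_setVis h w V i j a b hD hi0 hi1 hj0 hj1 ha ha' hb hb']
        simp only [List.mem_append, List.mem_singleton, Prod.mk.injEq]
        constructor
        · intro hor
          rcases Bool.or_eq_true_iff.mp hor with h' | h'
          · exact Or.inl ((hR a b ha ha' hb hb').mp h')
          · exact Or.inr (of_decide_eq_true h')
        · intro hor
          rcases hor with h' | h'
          · exact Bool.or_eq_true_iff.mpr (Or.inl ((hR a b ha ha' hb hb').mpr h'))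
          · exact Bool.or_eq_true_iff.mpr (Or.inr (decide_eq_true h'))
      have := ihj hbnd' (q ++ [(i, j)]) (pvSetVis V i j)
        (pvDims_set h w V i j hD hi0 hi1) hR'
      simp only [List.foldl_cons, if_pos hc]
      rw [List.filter_cons_of_pos (by simpa using hc)]
      simpa [List.append_assoc] using this
    · have := ihj hbnd' q V hD hR
      simp only [List.foldl_cons, if_neg hc]
      rw [List.filter_cons_of_neg (by simpa using hc)]
      exact this

-- the whole initialisation double loop
theorem pvInit_outer (h w : Int) (grid : List (List Int)) :
    ∀ (is : List Int), (∀ i ∈ is, 0 ≤ i ∧ i < h) →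
    ∀ (q : List (Int × Int)) (V : List (List Bool)), pvDims h w V → pvRelL h w V q →
      (is.foldl (fun s i =>
        (PySem.List.pyRange 0 w 1).foldl
          (fun (s : List (Int × Int) × List (List Bool)) j =>
            if PySem.List.pyGetD (PySem.List.pyGetD grid i []) j 0 = 0 then
              (s.1 ++ [(i, j)], pvSetVis s.2 i j)
            else s) s) (q, V)).1
        = q ++ is.flatMap (fun i =>
            ((PySem.List.pyRange 0 w 1).filter
                (fun j => PySem.List.pyGetD (PySem.List.pyGetD grid i []) j 0 = 0)).map
              (fun j => ((i, j) : Int × Int))) ∧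
      pvDims h w (is.foldl (fun s i =>
        (PySem.List.pyRange 0 w 1).foldl
          (fun (s : List (Int × Int) × List (List Bool)) j =>
            if PySem.List.pyGetD (PySem.List.pyGetD grid i []) j 0 = 0 then
              (s.1 ++ [(i, j)], pvSetVis s.2 i j)
            else s) s) (q, V)).2 ∧
      pvRelL h w (is.foldl (fun s i =>
        (PySem.List.pyRange 0 w 1).foldl
          (fun (s : List (Int × Int) × List (List Bool)) j =>
            if PySem.List.pyGetD (PySem.List.pyGetD grid i []) j 0 = 0 then
              (s.1 ++ [(i, j)], pvSetVis s.2 i j)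
            else s) s) (q, V)).2
        ((is.foldl (fun s i =>
        (PySem.List.pyRange 0 w 1).foldl
          (fun (s : List (Int × Int) × List (List Bool)) j =>
            if PySem.List.pyGetD (PySem.List.pyGetD grid i []) j 0 = 0 then
              (s.1 ++ [(i, j)], pvSetVis s.2 i j)
            else s) s) (q, V)).1) := by
  intro is
  induction is with
  | nil => intro _ q V hD hR; exact ⟨by simp, hD, hR⟩
  | cons i is ihs =>
    intro hbnd q V hD hR
    obtain ⟨hi0, hi1⟩ := hbnd i (List.mem_cons_self)
    have hbnd' := fun i hi => hbnd i (List.mem_cons_of_mem _ hi)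
    have hjbnd : ∀ j ∈ PySem.List.pyRange 0 w 1, 0 ≤ j ∧ j < w := by
      intro j hj
      have := (PySem.List.mem_pyRange_one (a := 0) (b := w) (x := j)).mp hj
      omega
    obtain ⟨e1, hD', hR'⟩ := pvInit_inner h w i grid hi0 hi1 (PySem.List.pyRange 0 w 1) hjbnd q V hD hR
    simp only [List.foldl_cons]
    rcases hfold : ((PySem.List.pyRange 0 w 1).foldl
          (fun (s : List (Int × Int) × List (List Bool)) j =>
            if PySem.List.pyGetD (PySem.List.pyGetD grid i []) j 0 = 0 then
              (s.1 ++ [(i, j)], pvSetVis s.2 i j)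
            else s) (q, V)) with ⟨q1, V1⟩
    rw [hfold] at e1 hD' hR'
    simp only at e1 hD' hR'
    obtain ⟨e2, hD'', hR''⟩ := ihs hbnd' q1 V1 hD' hR'
    refine ⟨?_, hD'', hR''⟩
    rw [e2, e1, List.flatMap_cons, List.append_assoc]

-- ---------- BFS level invariant ----------

-- cells of the k-th BFS level, as Int pairs
def pvLk (grid : List (List Int)) (k : Nat) (c : Int × Int) : Prop :=
  ∃ i j : Nat, c = ((i : Int), (j : Int)) ∧ i < grid.length ∧ j < pvWid grid ∧ pvD grid (i, j) = k

theorem pvLk_cast (grid : List (List Int)) (k i j : Nat) :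
    pvLk grid k ((i : Int), (j : Int)) ↔ (i < grid.length ∧ j < pvWid grid ∧ pvD grid (i, j) = k) := by
  constructor
  · rintro ⟨i', j', heq, h1, h2, h3⟩
    obtain ⟨e1, e2⟩ := Prod.mk.injEq .. ▸ heq
    have : i = i' ∧ j = j' := by
      constructor <;> [skip; skip] <;> omega
    obtain ⟨rfl, rfl⟩ := this
    exact ⟨h1, h2, h3⟩
  · rintro ⟨h1, h2, h3⟩
    exact ⟨i, j, rfl, h1, h2, h3⟩

-- visited matrix characterisation during level k: true exactly on distance ≤ k or membership in acc
def pvVinv (grid : List (List Int)) (k : Nat) (acc : List (Int × Int)) (V : List (List Bool)) : Prop :=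
  pvDims (grid.length : Int) ((pvWid grid : Nat) : Int) V ∧
  ∀ i j : Nat, i < grid.length → j < pvWid grid →
    (pvGetVis V (i : Int) (j : Int) = true ↔ (pvD grid (i, j) ≤ k ∨ ((i : Int), (j : Int)) ∈ acc))

theorem pvNbrs_md (x y : Nat) (c : Int × Int) (hc : c ∈ pvNbrs ((x : Int), (y : Int)))
    (h1 : 0 ≤ c.1) (h2 : 0 ≤ c.2) :
    pvMd (c.1.toNat, c.2.toNat) (x, y) = 1 := by
  simp only [pvNbrs, List.mem_cons, List.not_mem_nil, or_false] at hc
  rcases hc with rfl | rfl | rfl | rfl <;> simp only [pvMd, Nat.dist] <;> omega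

-- the fold over one popped cell's neighbour candidates
theorem pvDirFold (grid : List (List Int)) (k : Nat) (x y : Nat)
    (hx : x < grid.length) (hy : y < pvWid grid) (hDxy : pvD grid (x, y) = k) :
    ∀ (cs : List (Int × Int)), (∀ c ∈ cs, c ∈ pvNbrs ((x : Int), (y : Int))) →
    ∀ (rest acc : List (Int × Int)) (V : List (List Bool)),
      (∀ c ∈ acc, pvLk grid (k + 1) c) → pvVinv grid k acc V →
      ∃ acc',
        (cs.foldl (pvStepA (grid.length : Int) ((pvWid grid : Nat) : Int)) (rest ++ acc, V)).1
          = rest ++ acc' ∧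
        (∀ c ∈ acc', pvLk grid (k + 1) c) ∧
        pvVinv grid k acc'
          (cs.foldl (pvStepA (grid.length : Int) ((pvWid grid : Nat) : Int)) (rest ++ acc, V)).2 ∧
        (∀ c ∈ acc, c ∈ acc') ∧
        (∀ c ∈ cs, pvLk grid (k + 1) c → c ∈ acc') := by
  intro cs
  induction cs with
  | nil =>
    intro _ rest acc V hacc hV
    exact ⟨acc, rfl, hacc, hV, fun c hc => hc, by simp⟩
  | cons c cs ih =>
    intro hnb rest acc V hacc hV
    have hcnb := hnb c List.mem_cons_self
    have hnb' := fun c hc => hnb c (List.mem_cons_of_mem _ hc)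
    obtain ⟨hDim, hChar⟩ := hV
    by_cases hg : 0 ≤ c.1 ∧ c.1 < (grid.length : Int) ∧ 0 ≤ c.2 ∧ c.2 < ((pvWid grid : Nat) : Int) ∧
        pvGetVis V c.1 c.2 = false
    · obtain ⟨hg1, hg2, hg3, hg4, hg5⟩ := hg
      set iN := c.1.toNat with hiN
      set jN := c.2.toNat with hjN
      have hceq : c = ((iN : Int), (jN : Int)) := by
        obtain ⟨c1, c2⟩ := c; simp only [Prod.mk.injEq]; constructor <;> omega
      have hiNb : iN < grid.length := by omega
      have hjNb : jN < pvWid grid := by omega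
      have hmd1 : pvMd (iN, jN) (x, y) = 1 := pvNbrs_md x y c hcnb hg1 hg3
      have hc1 : c.1 = (iN : Int) := by omega
      have hc2 : c.2 = (jN : Int) := by omega
      have hnotvis : ¬ (pvD grid (iN, jN) ≤ k ∨ ((iN : Int), (jN : Int)) ∈ acc) := by
        intro hmem
        have hv := (hChar iN jN hiNb hjNb).mpr hmem
        rw [hc1, hc2] at hg5
        rw [hv] at hg5
        exact absurd hg5 (by simp)
      push_neg at hnotvis
      obtain ⟨hgtk, hnotacc⟩ := hnotvis
      have hle : pvD grid (iN, jN) ≤ k + 1 := by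
        have := pvD_lipschitz grid (iN, jN) (x, y)
        rw [hDxy, hmd1] at this
        omega
      have hDc : pvD grid (iN, jN) = k + 1 := by omega
      have hstep : pvStepA (grid.length : Int) ((pvWid grid : Nat) : Int) (rest ++ acc, V) c
          = ((rest ++ acc) ++ [c], pvSetVis V c.1 c.2) := by
        simp only [pvStepA]
        rw [if_pos ⟨hg1, hg2, hg3, hg4, hg5⟩]
      have hacc2 : ∀ c' ∈ acc ++ [c], pvLk grid (k + 1) c' := by
        intro c' hc'
        rcases List.mem_append.mp hc' with h' | h'
        · exact hacc c' h'
        · rw [List.mem_singleton.mp h', hceq]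
          exact (pvLk_cast grid (k + 1) iN jN).mpr ⟨hiNb, hjNb, hDc⟩
      have hV2 : pvVinv grid k (acc ++ [c]) (pvSetVis V c.1 c.2) := by
        refine ⟨pvDims_set _ _ V c.1 c.2 hDim hg1 hg2, ?_⟩
        intro a b hab hbb
        rw [pvGetVis_setVis _ _ V c.1 c.2 (a : Int) (b : Int) ⟨hDim.1, hDim.2⟩ hg1 hg2 hg3 hg4
              (by positivity) (by omega) (by positivity) (by omega)]
        constructor
        · intro hor
          rcases Bool.or_eq_true_iff.mp hor with h' | h'
          · rcases (hChar a b hab hbb).mp h' with h'' | h''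
            · exact Or.inl h''
            · exact Or.inr (List.mem_append.mpr (Or.inl h''))
          · obtain ⟨e1, e2⟩ := of_decide_eq_true h'
            right
            refine List.mem_append.mpr (Or.inr ?_)
            simp only [List.mem_singleton]
            obtain ⟨c1, c2⟩ := c
            simp only [Prod.mk.injEq]
            exact ⟨e1, e2⟩
        · intro hor
          rcases hor with h' | h'
          · exact Bool.or_eq_true_iff.mpr (Or.inl ((hChar a b hab hbb).mpr (Or.inl h')))
          · rcases List.mem_append.mp h' with h'' | h''
            · exact Bool.or_eq_true_iff.mpr (Or.inl ((hChar a b hab hbb).mpr (Or.inr h'')))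
            · refine Bool.or_eq_true_iff.mpr (Or.inr (decide_eq_true ?_))
              have heq := List.mem_singleton.mp h''
              obtain ⟨e1, e2⟩ := Prod.ext_iff.mp heq
              exact ⟨e1, e2⟩
      rcases ih hnb' rest (acc ++ [c]) (pvSetVis V c.1 c.2) hacc2 hV2 with
        ⟨acc', he, ha', hv', hmono, hcs⟩
      refine ⟨acc', ?_, ha', ?_, ?_, ?_⟩
      · rw [List.foldl_cons, hstep, List.append_assoc]
        exact he
      · rw [List.foldl_cons, hstep, List.append_assoc]
        exact hv'
      · intro c' hc'
        exact hmono c' (List.mem_append.mpr (Or.inl hc'))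
      · intro c' hc' hLk
        rcases List.mem_cons.mp hc' with rfl | h'
        · exact hmono c' (List.mem_append.mpr (Or.inr List.mem_cons_self))
        · exact hcs c' h' hLk
    · have hstep : pvStepA (grid.length : Int) ((pvWid grid : Nat) : Int) (rest ++ acc, V) c
          = (rest ++ acc, V) := by
        simp only [pvStepA]
        rw [if_neg hg]
      rcases ih hnb' rest acc V hacc ⟨hDim, hChar⟩ with ⟨acc', he, ha', hv', hmono, hcs⟩
      refine ⟨acc', ?_, ha', ?_, hmono, ?_⟩
      · rw [List.foldl_cons, hstep]; exact he
      · rw [List.foldl_cons, hstep]; exact hv'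
      · intro c' hc' hLk
        rcases List.mem_cons.mp hc' with rfl | h'
        · -- the guard failed although c' is a level-(k+1) cell: it must already be visited, hence in acc
          rcases hLk with ⟨iN, jN, hceq', hb1, hb2, hb3⟩
          subst hceq'
          have hvis : pvGetVis V (iN : Int) (jN : Int) = true := by
            by_contra hnv
            exact hg ⟨by positivity, by omega, by positivity, by omega, by simpa using hnv⟩
          rcases (hChar iN jN hb1 hb2).mp hvis with h'' | h''
          · omega
          · exact hmono _ h''
        · exact hcs c' h' hLk


-- one whole BFS level: pending level-k cells are popped, exactly the level-(k+1) cells collect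
theorem pvLevelA_inv (grid : List (List Int)) (k : Nat) :
    ∀ (pending acc : List (Int × Int)) (V : List (List Bool)),
      (∀ c ∈ pending, pvLk grid k c) →
      (∀ c ∈ acc, pvLk grid (k + 1) c) →
      (∀ c, pvLk grid (k + 1) c → c ∉ acc → ∃ p ∈ pending, c ∈ pvNbrs p) →
      pvVinv grid k acc V →
      (∀ c, c ∈ (pvLevelA (grid.length : Int) ((pvWid grid : Nat) : Int)
                    pending.length (pending ++ acc) V).1 ↔ pvLk grid (k + 1) c) ∧
      pvVinv grid k
        (pvLevelA (grid.length : Int) ((pvWid grid : Nat) : Int)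
            pending.length (pending ++ acc) V).1
        (pvLevelA (grid.length : Int) ((pvWid grid : Nat) : Int)
            pending.length (pending ++ acc) V).2 := by
  intro pending
  induction pending with
  | nil =>
    intro acc V _ hacc hcomp hV
    simp only [List.length_nil, List.nil_append, pvLevelA]
    refine ⟨?_, hV⟩
    intro c
    constructor
    · exact hacc c
    · intro hLk
      by_contra hno
      rcases hcomp c hLk hno with ⟨p, hp, _⟩
      simp at hp
  | cons xy rest ih =>
    intro acc V hpend hacc hcomp hV
    obtain ⟨x, y⟩ := xy
    rcases hpend (x, y) List.mem_cons_self with ⟨xN, yN, hxy, hxb, hyb, hxyD⟩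
    have hpend' := fun c hc => hpend c (List.mem_cons_of_mem _ hc)
    simp only [List.cons_append, List.length_cons, pvLevelA]
    have eA : (fun (s : List (Int × Int) × List (List Bool)) (d : Int × Int) =>
        let nx := x + d.1
        let ny := y + d.2
        if 0 ≤ nx ∧ nx < (grid.length : Int) ∧ 0 ≤ ny ∧ ny < ((pvWid grid : Nat) : Int) ∧
            pvGetVis s.2 nx ny = false then
          (s.1 ++ [(nx, ny)], pvSetVis s.2 nx ny)
        else s)
        = fun s d => pvStepA (grid.length : Int) ((pvWid grid : Nat) : Int) s (x + d.1, y + d.2) := rfl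
    rw [eA, ← List.foldl_map (f := fun (d : Int × Int) => ((x + d.1, y + d.2) : Int × Int))
          (g := pvStepA (grid.length : Int) ((pvWid grid : Nat) : Int))]
    have elist : pvDirs.map (fun (d : Int × Int) => ((x + d.1, y + d.2) : Int × Int))
        = pvNbrs (x, y) := by
      simp [pvDirs, pvNbrs, Prod.ext_iff]
      omega
    rw [elist]
    have hxynb : ∀ c ∈ pvNbrs (x, y), c ∈ pvNbrs (((xN : Nat) : Int), ((yN : Nat) : Int)) := by
      intro c hc; rw [← hxy]; exact hc
    rcases pvDirFold grid k xN yN hxb hyb hxyD (pvNbrs (x, y)) hxynb rest acc V hacc hV with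
      ⟨acc', he, ha', hv', hmono, hcs⟩
    rcases hfold : (pvNbrs (x, y)).foldl
        (pvStepA (grid.length : Int) ((pvWid grid : Nat) : Int)) (rest ++ acc, V) with ⟨q1, V1⟩
    rw [hfold] at he hv'
    simp only at he hv' ⊢
    rw [he]
    refine ih acc' V1 hpend' ha' ?_ hv'
    intro c hLk hno
    rcases hcomp c hLk (fun hin => hno (hmono c hin)) with ⟨p, hp, hpn⟩
    rcases List.mem_cons.mp hp with rfl | hp'
    · exact absurd (hcs c hpn hLk) hno
    · exact ⟨p, hp', hpn⟩

-- the while loop returns the maximal distance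
theorem pvWhileA_inv (grid : List (List Int)) (hne : pvZs grid ≠ []) :
    ∀ (n : Nat), ∀ (k : Nat) (q : List (Int × Int)) (V : List (List Bool)),
      k ≤ pvM grid → pvM grid - k + 2 ≤ n →
      (∀ c, c ∈ q ↔ pvLk grid k c) → pvVinv grid k [] V →
      pvWhileA (grid.length : Int) ((pvWid grid : Nat) : Int) n q V ((k : Int) - 1)
        = (pvM grid : Int) := by
  intro n
  induction n with
  | zero => intro k q V hk hn _ _; omega
  | succ m ih =>
    intro k q V hk hn hq hV
    have hqne : ¬ q.isEmpty := by
      rcases pvLevel_nonempty grid hne k hk with ⟨c, hc1, hc2, hc3⟩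
      have : ((c.1 : Int), (c.2 : Int)) ∈ q :=
        (hq _).mpr ⟨c.1, c.2, rfl, hc1, hc2, hc3⟩
      rcases q with _ | _
      · simp at this
      · simp
    simp only [pvWhileA, hqne, if_false, Bool.false_eq_true]
    have hcomp : ∀ c, pvLk grid (k + 1) c → c ∉ ([] : List (Int × Int)) →
        ∃ p ∈ q, c ∈ pvNbrs p := by
      intro c hLk _
      rcases hLk with ⟨iN, jN, rfl, hb1, hb2, hb3⟩
      rcases pvD_geodesic grid hne iN jN k hb1 hb2 hb3 with ⟨p, hp1, hp2, hp3, hp4⟩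
      exact ⟨((p.1 : Int), (p.2 : Int)), (hq _).mpr ⟨p.1, p.2, rfl, hp1, hp2, hp3⟩, hp4⟩
    have hq' : ∀ c ∈ q, pvLk grid k c := fun c hc => (hq c).mp hc
    have happ : q ++ ([] : List (Int × Int)) = q := List.append_nil q
    rcases pvLevelA_inv grid k q [] V hq' (by simp) hcomp hV with ⟨hq1, hV1⟩
    rw [happ] at hq1 hV1
    rcases hstate : pvLevelA (grid.length : Int) ((pvWid grid : Nat) : Int) q.length q V
      with ⟨q1, V1⟩
    rw [hstate] at hq1 hV1
    simp only at hq1 hV1 ⊢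
    have hV1' : pvVinv grid (k + 1) [] V1 := by
      refine ⟨hV1.1, ?_⟩
      intro i j hi hj
      rw [hV1.2 i j hi hj]
      constructor
      · rintro (h' | h')
        · exact Or.inl (by omega)
        · rcases (pvLk_cast grid (k + 1) i j).mp ((hq1 _).mp h') with ⟨_, _, hD⟩
          exact Or.inl (by omega)
      · rintro (h' | h')
        · rcases Nat.lt_or_ge (pvD grid (i, j)) (k + 1) with h'' | h''
          · exact Or.inl (by omega)
          · right
            exact (hq1 _).mpr ((pvLk_cast grid (k + 1) i j).mpr ⟨hi, hj, by omega⟩)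
        · simp at h'
    by_cases hkM : k = pvM grid
    · have hq1nil : q1 = [] := by
        rw [List.eq_nil_iff_forall_not_mem]
        intro c hc
        rcases (hq1 c).mp hc with ⟨iN, jN, rfl, hb1, hb2, hb3⟩
        have := pvD_le_M grid (iN, jN) hb1 hb2
        omega
      have hm : 1 ≤ m := by omega
      rcases m with _ | m'
      · omega
      · rw [hq1nil]
        simp only [pvWhileA, List.isEmpty_nil, if_true]
        push_cast
        omega
    · have := ih (k + 1) q1 V1 (by omega) (by omega) hq1 hV1'
      have harith : ((k : Int) - 1) + 1 = ((k + 1 : Nat) : Int) - 1 := by push_cast; ring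
      rw [harith]
      exact this


-- the initial queue contains exactly the zero cells
theorem pvMemQ0 (grid : List (List Int)) (c : Int × Int) :
    c ∈ (PySem.List.pyRange 0 (grid.length : Int) 1).flatMap (fun i =>
        ((PySem.List.pyRange 0 ((pvWid grid : Nat) : Int) 1).filter
            (fun j => PySem.List.pyGetD (PySem.List.pyGetD grid i []) j 0 = 0)).map
          (fun j => ((i, j) : Int × Int)))
      ↔ ∃ p ∈ pvZs grid, c = ((p.1 : Int), (p.2 : Int)) := by
  simp only [List.mem_flatMap, List.mem_map, List.mem_filter]
  constructor
  · rintro ⟨i, hi, j, ⟨hj, hj0⟩, rfl⟩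
    have hib := (PySem.List.mem_pyRange_one).mp hi
    have hjb := (PySem.List.mem_pyRange_one).mp hj
    have hieq : i = ((i.toNat : Nat) : Int) := by omega
    have hjeq : j = ((j.toNat : Nat) : Int) := by omega
    rw [hieq, hjeq, PySem.List.pyGetD_natCast, PySem.List.pyGetD_natCast] at hj0
    refine ⟨(i.toNat, j.toNat), (mem_pvZs grid _).mpr ⟨by omega, by omega, ?_⟩, ?_⟩
    · have : decide ((grid.getD i.toNat []).getD j.toNat 0 = 0) = true := by simpa using hj0
      simpa [pvG] using of_decide_eq_true this
    · simp only [Prod.mk.injEq]; omega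
  · rintro ⟨⟨a, b⟩, hp, rfl⟩
    obtain ⟨ha, hb, hg⟩ := (mem_pvZs grid (a, b)).mp hp
    refine ⟨(a : Int), ?_, (b : Int), ⟨?_, ?_⟩, rfl⟩
    · exact (PySem.List.mem_pyRange_one).mpr ⟨by positivity, by omega⟩
    · exact (PySem.List.mem_pyRange_one).mpr ⟨by positivity, by omega⟩
    · rw [PySem.List.pyGetD_natCast, PySem.List.pyGetD_natCast]
      simpa [pvG] using hg

-- from the initial queue and visited matrix, the while loop returns pvAns
theorem pvWhileA_final (grid : List (List Int)) (q0 : List (Int × Int)) (V : List (List Bool))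
    (hq : ∀ c, c ∈ q0 ↔ ∃ p ∈ pvZs grid, c = ((p.1 : Int), (p.2 : Int)))
    (hD : pvDims (grid.length : Int) ((pvWid grid : Nat) : Int) V)
    (hR : pvRelL (grid.length : Int) ((pvWid grid : Nat) : Int) V q0) :
    pvWhileA (grid.length : Int) ((pvWid grid : Nat) : Int)
      (grid.length * pvWid grid + 1) q0 V (-1) = pvAns grid := by
  by_cases hz : pvZs grid = []
  · have hq0nil : q0 = [] := by
      rw [List.eq_nil_iff_forall_not_mem]
      intro c hc
      rcases (hq c).mp hc with ⟨p, hp, _⟩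
      rw [hz] at hp
      simp at hp
    rw [hq0nil]
    unfold pvAns
    rw [if_pos hz]
    simp [pvWhileA]
  · have hqchar : ∀ c, c ∈ q0 ↔ pvLk grid 0 c := by
      intro c
      rw [hq c]
      constructor
      · rintro ⟨⟨a, b⟩, hp, rfl⟩
        obtain ⟨ha, hb, hg⟩ := (mem_pvZs grid (a, b)).mp hp
        exact ⟨a, b, rfl, ha, hb, (pvD_zero_iff grid a b ha hb).mpr hg⟩
      · rintro ⟨iN, jN, rfl, h1, h2, h3⟩
        exact ⟨(iN, jN), (mem_pvZs grid (iN, jN)).mpr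
          ⟨h1, h2, (pvD_zero_iff grid iN jN h1 h2).mp h3⟩, rfl⟩
    have hVinv : pvVinv grid 0 [] V := by
      refine ⟨hD, ?_⟩
      intro i j hi hj
      rw [hR (i : Int) (j : Int) (by positivity) (by omega) (by positivity) (by omega)]
      rw [hqchar ((i : Int), (j : Int)), pvLk_cast grid 0 i j]
      constructor
      · rintro ⟨_, _, h3⟩
        exact Or.inl (by omega)
      · rintro (h' | h')
        · exact ⟨hi, hj, by omega⟩
        · simp at h'
    have hfuel : pvM grid - 0 + 2 ≤ grid.length * pvWid grid + 1 := by
      have := pvM_succ_le grid hz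
      omega
    have := pvWhileA_inv grid hz (grid.length * pvWid grid + 1) 0 q0 V
      (Nat.zero_le _) hfuel hqchar hVinv
    unfold pvAns
    rw [if_neg hz]
    simpa using this

-- port A computes pvAns
theorem bfs_eq_pvAns (grid : List (List Int)) : bfs grid = pvAns grid := by
  have hW : (PySem.List.pyGetD grid 0 []).length = pvWid grid := by
    rw [PySem.List.pyGetD_zero]; rfl
  unfold bfs
  simp only [hW]
  have hD0 : pvDims (grid.length : Int) ((pvWid grid : Nat) : Int)
      ((PySem.List.pyRange 0 (grid.length : Int) 1).map
        (fun _ => (PySem.List.pyRange 0 ((pvWid grid : Nat) : Int) 1).map (fun _ => false))) := by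
    constructor
    · simp [PySem.List.length_pyRange_one]
    · intro row hrow
      rcases List.mem_map.mp hrow with ⟨_, _, rfl⟩
      simp [PySem.List.length_pyRange_one]
  have hR0 : pvRelL (grid.length : Int) ((pvWid grid : Nat) : Int)
      ((PySem.List.pyRange 0 (grid.length : Int) 1).map
        (fun _ => (PySem.List.pyRange 0 ((pvWid grid : Nat) : Int) 1).map (fun _ => false)))
      ([] : List (Int × Int)) := by
    have hall : ∀ row ∈ (PySem.List.pyRange 0 (grid.length : Int) 1).map
        (fun _ => (PySem.List.pyRange 0 ((pvWid grid : Nat) : Int) 1).map (fun _ => false)),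
        ∀ v ∈ row, v = false := by
      intro row hrow v hv
      rcases List.mem_map.mp hrow with ⟨_, _, rfl⟩
      rcases List.mem_map.mp hv with ⟨_, _, rfl⟩
      rfl
    intro a b _ _ _ _
    rw [pvGetVis_false _ hall a b]
    simp
  have hibnd : ∀ i ∈ PySem.List.pyRange 0 (grid.length : Int) 1,
      0 ≤ i ∧ i < (grid.length : Int) := by
    intro i hi
    have := (PySem.List.mem_pyRange_one).mp hi
    omega
  obtain ⟨e1, hD', hR'⟩ := pvInit_outer (grid.length : Int) ((pvWid grid : Nat) : Int)
    grid (PySem.List.pyRange 0 (grid.length : Int) 1) hibnd [] _ hD0 hR0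
  rw [List.nil_append] at e1
  rw [e1] at hR' ⊢
  exact pvWhileA_final grid _ _ (pvMemQ0 grid) hD' hR'


-- ---------- port B: the two-sweep DP computes pvAns ----------

def pvINF (grid : List (List Int)) : Int := (grid.length : Int) + ((pvWid grid : Nat) : Int)

-- value of the forward sweep at cell (i, j)
def pvEF (grid : List (List Int)) : Nat → Nat → Int
  | i, j =>
    let v0 : Int := if pvG grid i j = 0 then 0 else pvINF grid
    let v1 : Int := if _ : i = 0 then v0 else
      (if pvEF grid (i - 1) j + 1 < v0 then pvEF grid (i - 1) j + 1 else v0)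
    if _ : j = 0 then v1 else
      (if pvEF grid i (j - 1) + 1 < v1 then pvEF grid i (j - 1) + 1 else v1)
termination_by i j => (i, j)
decreasing_by
  · exact Prod.Lex.left _ _ (by omega)
  · exact Prod.Lex.right _ (by omega)

-- value of the backward sweep at cell (i, j)
def pvEB (grid : List (List Int)) : Nat → Nat → Int
  | i, j =>
    let v0 : Int := pvEF grid i j
    let v1 : Int := if _ : i + 1 < grid.length then
      (if pvEB grid (i + 1) j + 1 < v0 then pvEB grid (i + 1) j + 1 else v0) else v0
    if _ : j + 1 < pvWid grid then
      (if pvEB grid i (j + 1) + 1 < v1 then pvEB grid i (j + 1) + 1 else v1) else v1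
termination_by i j => (grid.length - i, pvWid grid - j)
decreasing_by
  · exact Prod.Lex.left _ _ (by omega)
  · exact Prod.Lex.right _ (by omega)

theorem pvD_cast_le_INF (grid : List (List Int)) (c : Nat × Nat) :
    ((pvD grid c : Nat) : Int) ≤ pvINF grid := by
  have := pvD_le_INF grid c
  unfold pvINF
  push_cast
  omega

-- the forward value dominates the true distance
theorem pvEF_ge (grid : List (List Int)) :
    ∀ (n i j : Nat), i + j = n → i < grid.length → j < pvWid grid →
      ((pvD grid (i, j) : Nat) : Int) ≤ pvEF grid i j := by
  intro n
  induction n using Nat.strong_induction_on with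
  | h n ih =>
    intro i j hn hi hj
    have hv00 : pvG grid i j = 0 → ((pvD grid (i, j) : Nat) : Int) ≤ 0 := by
      intro hg
      have : pvD grid (i, j) = 0 := (pvD_zero_iff grid i j hi hj).mpr hg
      simp [this]
    have hv01 : ((pvD grid (i, j) : Nat) : Int) ≤ pvINF grid := pvD_cast_le_INF grid (i, j)
    have hup : i ≠ 0 → ((pvD grid (i, j) : Nat) : Int) ≤ pvEF grid (i - 1) j + 1 := by
      intro hi0
      have h1 := ih (n - 1) (by omega) (i - 1) j (by omega) (by omega) hj
      have h2 : pvD grid (i, j) ≤ pvD grid (i - 1, j) + 1 := by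
        have := pvD_lipschitz grid (i, j) (i - 1, j)
        have hmd : pvMd (i, j) (i - 1, j) = 1 := by simp only [pvMd, Nat.dist]; omega
        omega
      push_cast at h1 ⊢
      omega
    have hleft : j ≠ 0 → ((pvD grid (i, j) : Nat) : Int) ≤ pvEF grid i (j - 1) + 1 := by
      intro hj0
      have h1 := ih (n - 1) (by omega) i (j - 1) (by omega) hi (by omega)
      have h2 : pvD grid (i, j) ≤ pvD grid (i, j - 1) + 1 := by
        have := pvD_lipschitz grid (i, j) (i, j - 1)
        have hmd : pvMd (i, j) (i, j - 1) = 1 := by simp only [pvMd, Nat.dist]; omega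
        omega
      push_cast at h1 ⊢
      omega
    rw [pvEF]
    split_ifs <;>
      first
        | exact hv00 (by assumption)
        | exact hv01
        | exact hup (by assumption)
        | exact hleft (by assumption)

-- the backward value dominates the true distance
theorem pvEB_ge (grid : List (List Int)) :
    ∀ (n i j : Nat), (grid.length - i) + (pvWid grid - j) = n → i < grid.length → j < pvWid grid →
      ((pvD grid (i, j) : Nat) : Int) ≤ pvEB grid i j := by
  intro n
  induction n using Nat.strong_induction_on with
  | h n ih =>
    intro i j hn hi hj
    have hv0 : ((pvD grid (i, j) : Nat) : Int) ≤ pvEF grid i j :=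
      pvEF_ge grid (i + j) i j rfl hi hj
    have hdown : i + 1 < grid.length → ((pvD grid (i, j) : Nat) : Int) ≤ pvEB grid (i + 1) j + 1 := by
      intro hi1
      have h1 := ih (n - 1) (by omega) (i + 1) j (by omega) (by omega) hj
      have h2 : pvD grid (i, j) ≤ pvD grid (i + 1, j) + 1 := by
        have := pvD_lipschitz grid (i, j) (i + 1, j)
        have hmd : pvMd (i, j) (i + 1, j) = 1 := by simp only [pvMd, Nat.dist]; omega
        omega
      push_cast at h1 ⊢
      omega
    have hright : j + 1 < pvWid grid → ((pvD grid (i, j) : Nat) : Int) ≤ pvEB grid i (j + 1) + 1 := by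
      intro hj1
      have h1 := ih (n - 1) (by omega) i (j + 1) (by omega) hi (by omega)
      have h2 : pvD grid (i, j) ≤ pvD grid (i, j + 1) + 1 := by
        have := pvD_lipschitz grid (i, j) (i, j + 1)
        have hmd : pvMd (i, j) (i, j + 1) = 1 := by simp only [pvMd, Nat.dist]; omega
        omega
      push_cast at h1 ⊢
      omega
    rw [pvEB]
    split_ifs <;>
      first
        | exact hv0
        | exact hdown (by assumption)
        | exact hright (by assumption)

-- one-step upper bounds read off the defining equations
theorem pvEF_le_v0 (grid : List (List Int)) (i j : Nat) :
    pvEF grid i j ≤ (if pvG grid i j = 0 then 0 else pvINF grid) := by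
  rw [pvEF]
  split_ifs <;> omega

theorem pvEF_le_up (grid : List (List Int)) (i j : Nat) (hi : i ≠ 0) :
    pvEF grid i j ≤ pvEF grid (i - 1) j + 1 := by
  rw [pvEF]
  split_ifs <;> omega

theorem pvEF_le_left (grid : List (List Int)) (i j : Nat) (hj : j ≠ 0) :
    pvEF grid i j ≤ pvEF grid i (j - 1) + 1 := by
  rw [pvEF]
  split_ifs <;> omega

theorem pvEB_le_F (grid : List (List Int)) (i j : Nat) : pvEB grid i j ≤ pvEF grid i j := by
  rw [pvEB]
  split_ifs <;> omega

theorem pvEB_le_down (grid : List (List Int)) (i j : Nat) (hi : i + 1 < grid.length) :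
    pvEB grid i j ≤ pvEB grid (i + 1) j + 1 := by
  rw [pvEB]
  split_ifs <;> omega

theorem pvEB_le_right (grid : List (List Int)) (i j : Nat) (hj : j + 1 < pvWid grid) :
    pvEB grid i j ≤ pvEB grid i (j + 1) + 1 := by
  rw [pvEB]
  split_ifs <;> omega

theorem pvEF_chain_up (grid : List (List Int)) :
    ∀ (d i j : Nat), pvEF grid (i + d) j ≤ pvEF grid i j + d := by
  intro d
  induction d with
  | zero => intro i j; simp
  | succ d ihd =>
    intro i j
    have h1 := pvEF_le_up grid (i + d + 1) j (by omega)
    have h2 := ihd i j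
    have he : i + d + 1 - 1 = i + d := by omega
    rw [he] at h1
    show pvEF grid (i + d + 1) j ≤ pvEF grid i j + ((d + 1 : Nat) : Int)
    push_cast
    omega

theorem pvEF_chain_left (grid : List (List Int)) :
    ∀ (d i j : Nat), pvEF grid i (j + d) ≤ pvEF grid i j + d := by
  intro d
  induction d with
  | zero => intro i j; simp
  | succ d ihd =>
    intro i j
    have h1 := pvEF_le_left grid i (j + d + 1) (by omega)
    have h2 := ihd i j
    have he : j + d + 1 - 1 = j + d := by omega
    rw [he] at h1
    show pvEF grid i (j + d + 1) ≤ pvEF grid i j + ((d + 1 : Nat) : Int)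
    push_cast
    omega

theorem pvEB_chain_down (grid : List (List Int)) :
    ∀ (d i j : Nat), i + d < grid.length → pvEB grid i j ≤ pvEB grid (i + d) j + d := by
  intro d
  induction d with
  | zero => intro i j _; simp
  | succ d ihd =>
    intro i j hb
    have h1 := ihd (i + 1) j (by omega)
    have h2 := pvEB_le_down grid i j (by omega)
    have he : i + 1 + d = i + (d + 1) := by omega
    rw [he] at h1
    push_cast
    omega

theorem pvEB_chain_right (grid : List (List Int)) :
    ∀ (d i j : Nat), j + d < pvWid grid → pvEB grid i j ≤ pvEB grid i (j + d) + d := by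
  intro d
  induction d with
  | zero => intro i j _; simp
  | succ d ihd =>
    intro i j hb
    have h1 := ihd i (j + 1) (by omega)
    have h2 := pvEB_le_right grid i j (by omega)
    have he : j + 1 + d = j + (d + 1) := by omega
    rw [he] at h1
    push_cast
    omega

theorem pvEF_zero_cell (grid : List (List Int)) (a b : Nat) (hg : pvG grid a b = 0) :
    pvEF grid a b ≤ 0 := by
  have := pvEF_le_v0 grid a b
  rw [if_pos hg] at this
  exact this

-- the backward value is at most the true distance
theorem pvEB_le_D (grid : List (List Int)) (i j : Nat) (hi : i < grid.length) (hj : j < pvWid grid) :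
    pvEB grid i j ≤ ((pvD grid (i, j) : Nat) : Int) := by
  rcases pvD_attains grid (i, j) with hINF | ⟨⟨a, b⟩, hz, hmd⟩
  · rw [hINF]
    have h1 := pvEB_le_F grid i j
    have h2 := pvEF_le_v0 grid i j
    have h3 : (if pvG grid i j = 0 then (0 : Int) else pvINF grid) ≤ pvINF grid := by
      split_ifs
      · unfold pvINF; push_cast; omega
      · omega
    unfold pvINF at *
    push_cast
    omega
  · obtain ⟨ha, hb, hg⟩ := (mem_pvZs grid (a, b)).mp hz
    have hz0 : pvEF grid a b ≤ 0 := pvEF_zero_cell grid a b hg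
    rw [hmd]
    simp only [pvMd]
    rcases Nat.le_total a i with hai | hia
    · rcases Nat.le_total b j with hbj | hjb
      · -- zero above-left: forward chains only
        have c1 := pvEF_chain_up grid (i - a) a j
        rw [show a + (i - a) = i by omega] at c1
        have c2 := pvEF_chain_left grid (j - b) a b
        rw [show b + (j - b) = j by omega] at c2
        have c3 := pvEB_le_F grid i j
        simp only [Nat.dist]
        push_cast at c1 c2 ⊢
        omega
      · -- zero above-right: forward down the column, then backward to the left
        have c1 := pvEB_chain_right grid (b - j) i j (by omega)
        rw [show j + (b - j) = b by omega] at c1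
        have c2 := pvEB_le_F grid i b
        have c3 := pvEF_chain_up grid (i - a) a b
        rw [show a + (i - a) = i by omega] at c3
        simp only [Nat.dist]
        push_cast at c1 c3 ⊢
        omega
    · rcases Nat.le_total b j with hbj | hjb
      · -- zero below-left: forward to the right along row a, then backward upwards
        have c1 := pvEB_chain_down grid (a - i) i j (by omega)
        rw [show i + (a - i) = a by omega] at c1
        have c2 := pvEB_le_F grid a j
        have c3 := pvEF_chain_left grid (j - b) a b
        rw [show b + (j - b) = j by omega] at c3
        simp only [Nat.dist]
        push_cast at c1 c3 ⊢
        omega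
      · -- zero below-right: backward chains only
        have c1 := pvEB_chain_down grid (a - i) i j (by omega)
        rw [show i + (a - i) = a by omega] at c1
        have c2 := pvEB_chain_right grid (b - j) a j (by omega)
        rw [show j + (b - j) = b by omega] at c2
        have c3 := pvEB_le_F grid a b
        simp only [Nat.dist]
        push_cast at c1 c2 ⊢
        omega

theorem pvEB_eq_D (grid : List (List Int)) (i j : Nat) (hi : i < grid.length) (hj : j < pvWid grid) :
    pvEB grid i j = ((pvD grid (i, j) : Nat) : Int) :=
  le_antisymm (pvEB_le_D grid i j hi hj)
    (pvEB_ge grid ((grid.length - i) + (pvWid grid - j)) i j rfl hi hj)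


-- one forward-pass step appends exactly pvEF i j
theorem pvFStep_eq (grid : List (List Int)) (iN : Nat) (dp : List (List Int))
    (hlen : dp.length = iN)
    (hval : iN ≠ 0 → ∀ j < pvWid grid, (dp.getD (iN - 1) []).getD j 0 = pvEF grid (iN - 1) j)
    (jN : Nat) (hj : jN < pvWid grid) (row : List Int) (hrlen : row.length = jN)
    (hrow : ∀ j' < jN, row.getD j' 0 = pvEF grid iN j') :
    pvFStep grid (pvINF grid) (iN : Int) dp row (jN : Int) = row ++ [pvEF grid iN jN] := by
  have g1 : PySem.List.pyGetD (PySem.List.pyGetD grid (iN : Int) []) (jN : Int) 0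
      = pvG grid iN jN := by
    simp [pvG]
  have g2 : iN ≠ 0 → PySem.List.pyGetD (PySem.List.pyGetD dp (-1) []) (jN : Int) 0
      = pvEF grid (iN - 1) jN := by
    intro h0
    have hne : dp ≠ [] := by
      intro h; rw [h] at hlen; simp at hlen; omega
    rw [PySem.List.pyGetD_neg_one dp [] hne]
    have hlast : dp.getLast hne = dp.getD (iN - 1) [] := by
      rw [List.getLast_eq_getElem, List.getD_eq_getElem _ _ (by omega : iN - 1 < dp.length)]
      congr 1
      omega
    rw [hlast, PySem.List.pyGetD_natCast]
    exact hval h0 jN hj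
  have g3 : jN ≠ 0 → PySem.List.pyGetD row (-1) 0 = pvEF grid iN (jN - 1) := by
    intro h0
    have hne : row ≠ [] := by
      intro h; rw [h] at hrlen; simp at hrlen; omega
    rw [PySem.List.pyGetD_neg_one row 0 hne]
    have hlast : row.getLast hne = row.getD (jN - 1) 0 := by
      rw [List.getLast_eq_getElem, List.getD_eq_getElem _ _ (by omega : jN - 1 < row.length)]
      congr 1
      omega
    rw [hlast]
    exact hrow (jN - 1) (by omega)
  by_cases hi0 : iN = 0
  · have hdp : dp = [] := by
      rw [← List.length_eq_zero_iff]; omega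
    by_cases hj0 : jN = 0
    · have hr0 : row = [] := by
        rw [← List.length_eq_zero_iff]; omega
      rw [pvEF]
      simp only [pvFStep, hdp, hr0, ne_eq, not_true_eq_false, false_and, if_false, g1,
        dif_pos hi0, dif_pos hj0]
    · have hrne : row ≠ [] := by
        intro h; rw [h] at hrlen; simp at hrlen; omega
      rw [pvEF]
      simp only [pvFStep, hdp, ne_eq, not_true_eq_false, false_and, if_false, g1, g3 hj0,
        hrne, not_false_eq_true, true_and, dif_pos hi0, dif_neg hj0]
  · have hdpne : dp ≠ [] := by
      intro h; rw [h] at hlen; simp at hlen; omega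
    by_cases hj0 : jN = 0
    · have hr0 : row = [] := by
        rw [← List.length_eq_zero_iff]; omega
      rw [pvEF]
      simp only [pvFStep, hdpne, ne_eq, not_false_eq_true, true_and, g1, g2 hi0, hr0,
        not_true_eq_false, false_and, if_false, dif_neg hi0, dif_pos hj0]
    · have hrne : row ≠ [] := by
        intro h; rw [h] at hrlen; simp at hrlen; omega
      rw [pvEF]
      simp only [pvFStep, hdpne, ne_eq, not_false_eq_true, true_and, g1, g2 hi0, g3 hj0,
        hrne, dif_neg hi0, dif_neg hj0]

-- one backward-pass step computes exactly pvEB i j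
theorem pvBStep_eq (grid : List (List Int)) (dp : List (List Int))
    (hdp : ∀ i' < grid.length, ∀ j < pvWid grid, (dp.getD i' []).getD j 0 = pvEF grid i' j)
    (iN : Nat) (hi : iN < grid.length) (below : List Int)
    (hbelow : if iN + 1 < grid.length then below.length = pvWid grid ∧
        (∀ j < pvWid grid, below.getD j 0 = pvEB grid (iN + 1) j) else below = [])
    (jN : Nat) (hj : jN < pvWid grid) (best : Int) (cur : List Int)
    (hclen : cur.length = pvWid grid - (jN + 1))
    (hcur : ∀ t, jN + 1 + t < pvWid grid → cur.getD t 0 = pvEB grid iN (jN + 1 + t)) :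
    pvBStep (pvINF grid) dp below (iN : Int) (best, cur) (jN : Int)
      = ((if pvEB grid iN jN < pvINF grid ∧ pvEB grid iN jN > best
          then pvEB grid iN jN else best), pvEB grid iN jN :: cur) := by
  have g1 : PySem.List.pyGetD (PySem.List.pyGetD dp (iN : Int) []) (jN : Int) 0
      = pvEF grid iN jN := by
    simp only [PySem.List.pyGetD_natCast]
    exact hdp iN hi jN hj
  by_cases hib : iN + 1 < grid.length
  · rw [if_pos hib] at hbelow
    obtain ⟨hblen, hbval⟩ := hbelow
    have hbne : below ≠ [] := by
      intro h; rw [h] at hblen; simp at hblen; omega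
    have g2 : PySem.List.pyGetD below (jN : Int) 0 = pvEB grid (iN + 1) jN := by
      rw [PySem.List.pyGetD_natCast]
      exact hbval jN hj
    by_cases hjb : jN + 1 < pvWid grid
    · have hcne : cur ≠ [] := by
        intro h; rw [h] at hclen; simp at hclen; omega
      have g3 : PySem.List.pyGetD cur 0 0 = pvEB grid iN (jN + 1) := by
        rw [PySem.List.pyGetD_zero]
        have := hcur 0 (by omega)
        simpa using this
      have hv : (if pvEB grid iN (jN + 1) + 1 <
            (if pvEB grid (iN + 1) jN + 1 < pvEF grid iN jN then pvEB grid (iN + 1) jN + 1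
              else pvEF grid iN jN) then pvEB grid iN (jN + 1) + 1
            else (if pvEB grid (iN + 1) jN + 1 < pvEF grid iN jN then pvEB grid (iN + 1) jN + 1
              else pvEF grid iN jN)) = pvEB grid iN jN := by
        conv_rhs => rw [pvEB]
        simp only [dif_pos hib, dif_pos hjb]
      simp only [pvBStep, g1, hbne, ne_eq, not_false_eq_true, true_and, g2, hcne, g3]
      rw [hv]
      rfl
    · have hc0 : cur = [] := by
        rw [← List.length_eq_zero_iff]; omega
      have hv : (if pvEB grid (iN + 1) jN + 1 < pvEF grid iN jN then pvEB grid (iN + 1) jN + 1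
            else pvEF grid iN jN) = pvEB grid iN jN := by
        conv_rhs => rw [pvEB]
        simp only [dif_pos hib, dif_neg hjb]
      simp only [pvBStep, g1, hbne, ne_eq, not_false_eq_true, true_and, g2, hc0,
        not_true_eq_false, false_and, if_false]
      rw [hv]
      rfl
  · rw [if_neg hib] at hbelow
    have hb0 : below = [] := hbelow
    by_cases hjb : jN + 1 < pvWid grid
    · have hcne : cur ≠ [] := by
        intro h; rw [h] at hclen; simp at hclen; omega
      have g3 : PySem.List.pyGetD cur 0 0 = pvEB grid iN (jN + 1) := by
        rw [PySem.List.pyGetD_zero]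
        have := hcur 0 (by omega)
        simpa using this
      have hv : (if pvEB grid iN (jN + 1) + 1 < pvEF grid iN jN then pvEB grid iN (jN + 1) + 1
            else pvEF grid iN jN) = pvEB grid iN jN := by
        conv_rhs => rw [pvEB]
        simp only [dif_neg hib, dif_pos hjb]
      simp only [pvBStep, g1, hb0, ne_eq, not_true_eq_false, false_and, if_false, hcne,
        not_false_eq_true, true_and, g3]
      rw [hv]
      rfl
    · have hc0 : cur = [] := by
        rw [← List.length_eq_zero_iff]; omega
      have hv : pvEF grid iN jN = pvEB grid iN jN := by
        conv_rhs => rw [pvEB]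
        simp only [dif_neg hib, dif_neg hjb]
      simp only [pvBStep, g1, hb0, hc0, ne_eq, not_true_eq_false, false_and, if_false]
      rw [hv]
      rfl


theorem pvGetD_append_left {α : Type} (l l2 : List α) (n : Nat) (d : α) (h : n < l.length) :
    (l ++ l2).getD n d = l.getD n d := by
  rw [List.getD_eq_getElem?_getD, List.getElem?_append_left (by omega),
    ← List.getD_eq_getElem?_getD]

theorem pvGetD_append_self {α : Type} (l : List α) (x : α) (d : α) :
    (l ++ [x]).getD l.length d = x := by
  rw [List.getD_eq_getElem?_getD, List.getElem?_concat_length]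
  rfl

-- the forward row fold fills a whole row with pvEF values
theorem pvFwdRow (grid : List (List Int)) (iN : Nat) (dp : List (List Int))
    (hlen : dp.length = iN)
    (hval : iN ≠ 0 → ∀ j < pvWid grid, (dp.getD (iN - 1) []).getD j 0 = pvEF grid (iN - 1) j) :
    ∀ (n jc : Nat), jc + n = pvWid grid → ∀ (row : List Int), row.length = jc →
      (∀ j' < jc, row.getD j' 0 = pvEF grid iN j') →
      ((PySem.List.pyRange (jc : Int) ((pvWid grid : Nat) : Int) 1).foldl
          (pvFStep grid (pvINF grid) (iN : Int) dp) row).length = pvWid grid ∧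
      ∀ j' < pvWid grid,
        ((PySem.List.pyRange (jc : Int) ((pvWid grid : Nat) : Int) 1).foldl
          (pvFStep grid (pvINF grid) (iN : Int) dp) row).getD j' 0 = pvEF grid iN j' := by
  intro n
  induction n with
  | zero =>
    intro jc hjc row hrl hre
    rw [PySem.List.pyRange_one_eq_nil (by omega : ((pvWid grid : Nat) : Int) ≤ (jc : Int))]
    simp only [List.foldl_nil]
    exact ⟨by omega, fun j' hj' => hre j' (by omega)⟩
  | succ n ihn =>
    intro jc hjc row hrl hre
    have hjw : jc < pvWid grid := by omega
    rw [PySem.List.pyRange_one_cons (by omega : (jc : Int) < ((pvWid grid : Nat) : Int))]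
    rw [List.foldl_cons]
    rw [pvFStep_eq grid iN dp hlen hval jc hjw row hrl hre]
    rw [show ((jc : Int) + 1) = ((jc + 1 : Nat) : Int) by push_cast; ring]
    refine ihn (jc + 1) (by omega) (row ++ [pvEF grid iN jc]) (by simp [hrl]) ?_
    intro j' hj'
    rcases Nat.lt_or_ge j' jc with hlt | hge
    · rw [pvGetD_append_left _ _ _ _ (by omega)]
      exact hre j' hlt
    · have hj'' : j' = jc := by omega
      subst hj''
      rw [show j' = row.length from hrl.symm, pvGetD_append_self]

-- the forward pass builds the whole pvEF table
theorem pvFwdAll (grid : List (List Int)) :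
    ∀ (n ic : Nat), ic + n = grid.length → ∀ (dp : List (List Int)), dp.length = ic →
      (∀ i' < ic, ∀ j < pvWid grid, (dp.getD i' []).getD j 0 = pvEF grid i' j) →
      ((PySem.List.pyRange (ic : Int) (grid.length : Int) 1).foldl
          (fun (dp : List (List Int)) i =>
            dp ++ [(PySem.List.pyRange 0 ((pvWid grid : Nat) : Int) 1).foldl
              (pvFStep grid (pvINF grid) i dp) []]) dp).length = grid.length ∧
      ∀ i' < grid.length, ∀ j < pvWid grid,
        (((PySem.List.pyRange (ic : Int) (grid.length : Int) 1).foldl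
          (fun (dp : List (List Int)) i =>
            dp ++ [(PySem.List.pyRange 0 ((pvWid grid : Nat) : Int) 1).foldl
              (pvFStep grid (pvINF grid) i dp) []]) dp).getD i' []).getD j 0
          = pvEF grid i' j := by
  intro n
  induction n with
  | zero =>
    intro ic hic dp hlen hdpv
    rw [PySem.List.pyRange_one_eq_nil (by omega : (grid.length : Int) ≤ (ic : Int))]
    simp only [List.foldl_nil]
    exact ⟨by omega, fun i' hi' => hdpv i' (by omega)⟩
  | succ n ihn =>
    intro ic hic dp hlen hdpv
    have hih : ic < grid.length := by omega
    rw [PySem.List.pyRange_one_cons (by omega : (ic : Int) < (grid.length : Int))]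
    rw [List.foldl_cons]
    have hval : ic ≠ 0 → ∀ j < pvWid grid,
        (dp.getD (ic - 1) []).getD j 0 = pvEF grid (ic - 1) j := by
      intro h0 j hj
      exact hdpv (ic - 1) (by omega) j hj
    have hrow := pvFwdRow grid ic dp hlen hval (pvWid grid) 0 (by omega) [] rfl (by omega)
    rw [Nat.cast_zero] at hrow
    obtain ⟨hrowlen, hrowval⟩ := hrow
    rw [show ((ic : Int) + 1) = ((ic + 1 : Nat) : Int) by push_cast; ring]
    refine ihn (ic + 1) (by omega)
      (dp ++ [(PySem.List.pyRange 0 ((pvWid grid : Nat) : Int) 1).foldl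
        (pvFStep grid (pvINF grid) (ic : Int) dp) []]) (by simp [hlen]) ?_
    intro i' hi' j hj
    rcases Nat.lt_or_ge i' ic with hlt | hge
    · rw [pvGetD_append_left _ _ _ _ (by omega)]
      exact hdpv i' hlt j hj
    · have hi'' : i' = ic := by omega
      subst hi''
      have hsel := pvGetD_append_self dp
        ((PySem.List.pyRange 0 ((pvWid grid : Nat) : Int) 1).foldl
          (pvFStep grid (pvINF grid) ((i' : Nat) : Int) dp) []) ([] : List Int)
      rw [hlen] at hsel
      rw [hsel]
      exact hrowval j hj

-- the backward row fold: finished row below, running maximum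
theorem pvBwdRow (grid : List (List Int)) (dp : List (List Int))
    (hdp : ∀ i' < grid.length, ∀ j < pvWid grid, (dp.getD i' []).getD j 0 = pvEF grid i' j)
    (iN : Nat) (hi : iN < grid.length) (below : List Int)
    (hbelow : if iN + 1 < grid.length then below.length = pvWid grid ∧
        (∀ j < pvWid grid, below.getD j 0 = pvEB grid (iN + 1) j) else below = []) :
    ∀ (jc : Nat), jc ≤ pvWid grid → ∀ (best : Int) (cur : List Int),
      cur.length = pvWid grid - jc →
      (∀ t, jc + t < pvWid grid → cur.getD t 0 = pvEB grid iN (jc + t)) →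
      ((PySem.List.pyRange ((jc : Int) - 1) (-1) (-1)).foldl
          (pvBStep (pvINF grid) dp below (iN : Int)) (best, cur)).2.length = pvWid grid ∧
      (∀ t < pvWid grid,
        ((PySem.List.pyRange ((jc : Int) - 1) (-1) (-1)).foldl
          (pvBStep (pvINF grid) dp below (iN : Int)) (best, cur)).2.getD t 0 = pvEB grid iN t) ∧
      best ≤ ((PySem.List.pyRange ((jc : Int) - 1) (-1) (-1)).foldl
          (pvBStep (pvINF grid) dp below (iN : Int)) (best, cur)).1 ∧
      (∀ j < jc, pvEB grid iN j < pvINF grid →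
        pvEB grid iN j ≤ ((PySem.List.pyRange ((jc : Int) - 1) (-1) (-1)).foldl
          (pvBStep (pvINF grid) dp below (iN : Int)) (best, cur)).1) ∧
      (((PySem.List.pyRange ((jc : Int) - 1) (-1) (-1)).foldl
          (pvBStep (pvINF grid) dp below (iN : Int)) (best, cur)).1 = best ∨
        ∃ j < pvWid grid, ((PySem.List.pyRange ((jc : Int) - 1) (-1) (-1)).foldl
          (pvBStep (pvINF grid) dp below (iN : Int)) (best, cur)).1 = pvEB grid iN j ∧
          pvEB grid iN j < pvINF grid) := by
  intro jc
  induction jc with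
  | zero =>
    intro _ best cur hclen hcv
    rw [show PySem.List.pyRange (((0 : Nat) : Int) - 1) (-1) (-1) = [] from by
      rw [show (((0 : Nat) : Int) - 1 : Int) = -1 by simp]
      exact PySem.List.pyRange_neg_one_eq_nil (by omega)]
    simp only [List.foldl_nil]
    refine ⟨by omega, ?_, le_refl _, fun j hj => absurd hj (by omega), Or.inl (by simp)⟩
    intro t ht
    simpa using hcv t (by omega)
  | succ jc ihjc =>
    intro hjw best cur hclen hcv
    have hjc : jc < pvWid grid := by omega
    rw [show ((jc + 1 : Nat) : Int) - 1 = (jc : Int) by push_cast; ring]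
    rw [PySem.List.pyRange_neg_one_cons (by omega : (-1 : Int) < (jc : Int))]
    rw [List.foldl_cons]
    rw [pvBStep_eq grid dp hdp iN hi below hbelow jc hjc best cur hclen
      (fun t ht => hcv t (by omega))]
    set best' := if pvEB grid iN jc < pvINF grid ∧ pvEB grid iN jc > best
      then pvEB grid iN jc else best with hbest'
    have hb1 : best ≤ best' := by
      rw [hbest']; split_ifs <;> omega
    have hb2 : pvEB grid iN jc < pvINF grid → pvEB grid iN jc ≤ best' := by
      intro hfin
      rw [hbest']; split_ifs <;> omega
    have hb3 : best' = best ∨ (best' = pvEB grid iN jc ∧ pvEB grid iN jc < pvINF grid) := by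
      rw [hbest']; split_ifs with h
      · exact Or.inr ⟨rfl, h.1⟩
      · exact Or.inl rfl
    have hcur' : ∀ t, jc + t < pvWid grid →
        (pvEB grid iN jc :: cur).getD t 0 = pvEB grid iN (jc + t) := by
      intro t ht
      cases t with
      | zero => simp
      | succ t =>
        simp only [List.getD_cons_succ]
        rw [show jc + (t + 1) = jc + 1 + t by omega]
        exact hcv t (by omega)
    obtain ⟨r1, r2, r3, r4, r5⟩ := ihjc (by omega) best' (pvEB grid iN jc :: cur)
      (by simp; omega) hcur'
    refine ⟨r1, r2, le_trans hb1 r3, ?_, ?_⟩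
    · intro j hj hfin
      rcases Nat.lt_or_ge j jc with hlt | hge
      · exact r4 j hlt hfin
      · have : j = jc := by omega
        subst this
        exact le_trans (hb2 hfin) r3
    · rcases r5 with r5 | r5
      · rcases hb3 with hb3 | hb3
        · exact Or.inl (by rw [r5, hb3])
        · exact Or.inr ⟨jc, hjc, by rw [r5, hb3.1], hb3.2⟩
      · exact Or.inr r5

-- the backward pass over all rows: the final accumulator
theorem pvBwdAll (grid : List (List Int)) (dp : List (List Int))
    (hdp : ∀ i' < grid.length, ∀ j < pvWid grid, (dp.getD i' []).getD j 0 = pvEF grid i' j) :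
    ∀ (ic : Nat), ic ≤ grid.length → ∀ (best : Int) (below : List Int),
      (if ic < grid.length then below.length = pvWid grid ∧
          (∀ j < pvWid grid, below.getD j 0 = pvEB grid ic j) else below = []) →
      best ≤ ((PySem.List.pyRange ((ic : Int) - 1) (-1) (-1)).foldl
          (fun (s : Int × List Int) i =>
            (PySem.List.pyRange (((pvWid grid : Nat) : Int) - 1) (-1) (-1)).foldl
              (pvBStep (pvINF grid) dp s.2 i) (s.1, [])) (best, below)).1 ∧
      (∀ i' < ic, ∀ j < pvWid grid, pvEB grid i' j < pvINF grid →
        pvEB grid i' j ≤ ((PySem.List.pyRange ((ic : Int) - 1) (-1) (-1)).foldl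
          (fun (s : Int × List Int) i =>
            (PySem.List.pyRange (((pvWid grid : Nat) : Int) - 1) (-1) (-1)).foldl
              (pvBStep (pvINF grid) dp s.2 i) (s.1, [])) (best, below)).1) ∧
      (((PySem.List.pyRange ((ic : Int) - 1) (-1) (-1)).foldl
          (fun (s : Int × List Int) i =>
            (PySem.List.pyRange (((pvWid grid : Nat) : Int) - 1) (-1) (-1)).foldl
              (pvBStep (pvINF grid) dp s.2 i) (s.1, [])) (best, below)).1 = best ∨
        ∃ i' < grid.length, ∃ j < pvWid grid,
          ((PySem.List.pyRange ((ic : Int) - 1) (-1) (-1)).foldl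
            (fun (s : Int × List Int) i =>
              (PySem.List.pyRange (((pvWid grid : Nat) : Int) - 1) (-1) (-1)).foldl
                (pvBStep (pvINF grid) dp s.2 i) (s.1, [])) (best, below)).1 = pvEB grid i' j ∧
            pvEB grid i' j < pvINF grid) := by
  intro ic
  induction ic with
  | zero =>
    intro _ best below _
    rw [show PySem.List.pyRange (((0 : Nat) : Int) - 1) (-1) (-1) = [] from by
      rw [show (((0 : Nat) : Int) - 1 : Int) = -1 by simp]
      exact PySem.List.pyRange_neg_one_eq_nil (by omega)]
    simp only [List.foldl_nil]
    exact ⟨le_refl _, fun i' hi' => absurd hi' (by omega), Or.inl (by simp)⟩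
  | succ ic ihic =>
    intro hich best below hbelow
    have hic : ic < grid.length := by omega
    rw [show ((ic + 1 : Nat) : Int) - 1 = (ic : Int) by push_cast; ring]
    rw [PySem.List.pyRange_neg_one_cons (by omega : (-1 : Int) < (ic : Int))]
    rw [List.foldl_cons]
    have hbelow' : if ic + 1 < grid.length then below.length = pvWid grid ∧
        (∀ j < pvWid grid, below.getD j 0 = pvEB grid (ic + 1) j) else below = [] := hbelow
    obtain ⟨q1, q2, q3, q4, q5⟩ := pvBwdRow grid dp hdp ic hic below hbelow'
      (pvWid grid) (le_refl _) best [] (by simp) (fun t ht => absurd ht (by omega))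
    rcases hrow : (PySem.List.pyRange (((pvWid grid : Nat) : Int) - 1) (-1) (-1)).foldl
        (pvBStep (pvINF grid) dp below (ic : Int)) (best, []) with ⟨best1, cur⟩
    rw [hrow] at q1 q2 q3 q4 q5
    simp only at q1 q2 q3 q4 q5 ⊢
    obtain ⟨w1, w2, w3⟩ := ihic (by omega) best1 cur
      (by rw [if_pos hic]; exact ⟨q1, q2⟩)
    refine ⟨le_trans q3 w1, ?_, ?_⟩
    · intro i' hi' j hj hfin
      rcases Nat.lt_or_ge i' ic with hlt | hge
      · exact w2 i' hlt j hj hfin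
      · have : i' = ic := by omega
        subst this
        exact le_trans (q4 j hj hfin) w1
    · rcases w3 with w3 | w3
      · rcases q5 with q5 | q5
        · exact Or.inl (by rw [w3, q5])
        · rcases q5 with ⟨j, hj, he, hfin⟩
          exact Or.inr ⟨ic, hic, j, hj, by rw [w3, he], hfin⟩
      · exact Or.inr w3


-- port B computes pvAns
theorem bfs_alt_eq_pvAns (grid : List (List Int)) : bfs_alt grid = pvAns grid := by
  have hW : (PySem.List.pyGetD grid 0 []).length = pvWid grid := by
    rw [PySem.List.pyGetD_zero]; rfl
  unfold bfs_alt
  simp only [hW]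
  rw [show ((grid.length : Int) + ((pvWid grid : Nat) : Int)) = pvINF grid from rfl]
  have hfwd := pvFwdAll grid grid.length 0 (by omega) [] rfl (by omega)
  rw [Nat.cast_zero] at hfwd
  obtain ⟨hdplen, hdpval⟩ := hfwd
  have hbwd := pvBwdAll grid _ hdpval grid.length (le_refl _) (-1) []
    (by rw [if_neg (by omega)])
  obtain ⟨b1, b2, b3⟩ := hbwd
  unfold pvAns
  by_cases hz : pvZs grid = []
  · rw [if_pos hz]
    rcases b3 with h | ⟨i', hi', j, hj, hF, hfin⟩
    · exact h
    · exfalso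
      have hEB : pvEB grid i' j = pvINF grid := by
        rw [pvEB_eq_D grid i' j hi' hj]
        have hD : pvD grid (i', j) = grid.length + pvWid grid := by
          unfold pvD; rw [hz]; simp
        rw [hD]; unfold pvINF; push_cast; ring
      omega
  · rw [if_neg hz]
    rcases pvM_attains grid hz with ⟨c, hc1, hc2, hcD⟩
    have hEB : pvEB grid c.1 c.2 = ((pvM grid : Nat) : Int) := by
      rw [pvEB_eq_D grid c.1 c.2 hc1 hc2]
      rw [show pvD grid (c.1, c.2) = pvM grid from hcD]
    have hfin : pvEB grid c.1 c.2 < pvINF grid := by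
      rw [hEB]
      have := pvD_lt_INF grid c hz hc1 hc2
      rw [hcD] at this
      unfold pvINF; push_cast; omega
    have hgeM := b2 c.1 hc1 c.2 hc2 hfin
    rw [hEB] at hgeM
    rcases b3 with h | ⟨i', hi', j, hj, hF, _⟩
    · exfalso
      rw [h] at hgeM
      omega
    · rw [hF]
      rw [pvEB_eq_D grid i' j hi' hj] at hF ⊢
      have hle := pvD_le_M grid (i', j) hi' hj
      rw [hF] at hgeM
      omega

-- ===== VERDICT (by name: the statement is the Claim_ definition above) =====
theorem bfs_spec : Claim_equal_bfs := by
  intro grid _ _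
  unfold Spec_bfs
  rw [bfs_eq_pvAns, bfs_alt_eq_pvAns]
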